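-- pv_equiv track=rewrite | github.com/vbeeler/thesis | p2.py | hook_lengths
-- ===== SOURCE A (Python) =====
-- def hook_lengths(int_part):
--
--    hook_lengths = []
--
--    # length of the partition
--    part_length = len(int_part)
--
--    # maximum element of the partition
--    max_part = int_part[0]
--
--    # track # cells above a given column to compute hook lengths
--    cells_above = [0] * max_part
--
--    # iterate in reverse order (increasing) through the partition
--    for i in range(part_length - 1, -1, -1):
--       cur_row_len = int_part[i]
--       cur_row_hooks = []
--
--       # compute hook length at each cell by adding # of cells above + to the
--       #   right (including current cell)
--       for j in range(cur_row_len):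
--          cur_row_hooks.append(cells_above[j] + cur_row_len - j)
--
--       # add the current row of hook lengths to the result
--       hook_lengths.append(cur_row_hooks)
--
--       # increment the counter of cells above to keep track for the next row
--       for i in range(cur_row_len):
--          cells_above[i] = cells_above[i] + 1
--
--    return(hook_lengths)
-- ===== SOURCE B (Python) =====
-- def hook_lengths(int_part):
--     rows = [[int_part[i] - j + sum(1 for r in int_part[i + 1:] if r > j)
--              for j in range(int_part[i])]
--             for i in range(len(int_part))]
--     rows.reverse()
--     return rows
-- ===== Notes on version B (the rewrite author's own statement) =====
-- stated objective: simpler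
-- what changed: B drops A's mutable cells_above counter array and reverse-order loop: each hook length is computed directly as row length minus column plus a count of rows below whose length exceeds the column, via nested comprehensions over the rows top-down, with one final reverse to match A's bottom-up row order.
import Mathlib
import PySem

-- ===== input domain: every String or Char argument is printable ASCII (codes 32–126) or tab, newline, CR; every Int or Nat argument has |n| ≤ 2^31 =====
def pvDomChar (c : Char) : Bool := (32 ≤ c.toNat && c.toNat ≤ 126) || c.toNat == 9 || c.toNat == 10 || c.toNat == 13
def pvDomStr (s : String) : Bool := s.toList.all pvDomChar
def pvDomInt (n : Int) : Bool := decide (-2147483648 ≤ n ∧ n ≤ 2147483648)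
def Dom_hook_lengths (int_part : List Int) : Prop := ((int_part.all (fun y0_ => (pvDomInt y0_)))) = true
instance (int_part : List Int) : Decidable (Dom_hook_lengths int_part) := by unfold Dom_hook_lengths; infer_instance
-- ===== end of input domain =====

-- B replaces A's mutable cells_above counter array (filled bottom-up) by a direct per-cell count
-- of the rows below, built top-down with comprehensions and reversed once (objective: simpler).


-- ===== PORT A =====
-- [0]*max_part is List.replicate max_part.toNat 0 (negative count gives [], as in Python).
def hook_lengths (int_part : List Int) : List (List Int) :=
  let part_length : Int := int_part.length
  let max_part := PySem.List.pyGetD int_part 0 0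
  let cells_above : List Int := List.replicate max_part.toNat 0
  let st := (PySem.List.pyRange (part_length - 1) (-1) (-1)).foldl
    (fun (st : List Int × List (List Int)) i =>
      let cur_row_len := PySem.List.pyGetD int_part i 0
      let cur_row_hooks := (PySem.List.pyRange 0 cur_row_len 1).foldl
        (fun r j => r ++ [PySem.List.pyGetD st.1 j 0 + cur_row_len - j]) []
      let cells' := (PySem.List.pyRange 0 cur_row_len 1).foldl
        (fun cs i2 => PySem.List.pySetD cs i2 (PySem.List.pyGetD cs i2 0 + 1)) st.1
      (cells', st.2 ++ [cur_row_hooks]))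
    (cells_above, [])
  st.2

-- ===== PORT B =====
def hook_lengths_alt (int_part : List Int) : List (List Int) :=
  let rows := (PySem.List.pyRange 0 (int_part.length : Int) 1).map (fun i =>
    (PySem.List.pyRange 0 (PySem.List.pyGetD int_part i 0) 1).map (fun j =>
      PySem.List.pyGetD int_part i 0 - j +
        ((PySem.List.slice int_part (some (i + 1)) none).map
          (fun r => if r > j then (1 : Int) else 0)).sum))
  rows.reverse

-- ===== PRECONDITION & SPEC =====
-- Pre_ excludes exactly the inputs where A raises IndexError: the empty list (int_part[0]),
-- and lists with a positive element exceeding the first (cells_above indexed out of range).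
def Pre_hook_lengths (int_part : List Int) : Prop :=
  int_part ≠ [] ∧ ∀ x ∈ int_part, 0 < x → x ≤ int_part.headI
instance (int_part : List Int) : Decidable (Pre_hook_lengths int_part) := by
  unfold Pre_hook_lengths; infer_instance

def pvWitness_hook_lengths : List Int := [4, 2, 1]

def Spec_hook_lengths (int_part : List Int) (out : List (List Int)) : Prop :=
  out = hook_lengths_alt int_part
instance (int_part : List Int) (out : List (List Int)) : Decidable (Spec_hook_lengths int_part out) := by
  unfold Spec_hook_lengths; infer_instance

-- ===== CLAIM (what is proved, stated in full; the proofs are below) =====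
def Claim_equal_hook_lengths : Prop := ∀ (int_part : List Int), Dom_hook_lengths int_part →
  Pre_hook_lengths int_part → Spec_hook_lengths int_part (hook_lengths int_part)

-- ===== LEMMAS AND PROOFS =====

def pvCnt (l : List Int) (j : Int) : Int := (l.map (fun r => if r > j then (1 : Int) else 0)).sum
def pvCells (m : Nat) (p : List Int) : List Int := (List.range m).map (fun (j : Nat) => pvCnt p (j : Int))

theorem pv_bump_aux (m : Nat) (p : List Int) : ∀ (t : Nat), t ≤ m →
    (PySem.List.pyRange 0 (t : Int) 1).foldl
      (fun cs i2 => PySem.List.pySetD cs i2 (PySem.List.pyGetD cs i2 0 + 1)) (pvCells m p)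
    = (List.range m).map (fun (j : Nat) => pvCnt p (j : Int) + if (j : Int) < (t : Int) then 1 else 0) := by
  intro t
  induction t with
  | zero =>
    intro _
    rw [PySem.List.pyRange_one_eq_nil (by omega)]
    simp only [List.foldl_nil, pvCells]
    apply List.map_congr_left
    intro j _
    have : ¬ ((j : Int) < (0 : Nat)) := by omega
    rw [if_neg this, add_zero]
  | succ t ih =>
    intro hle
    have ht : t < m := by omega
    rw [show ((((t : Nat) + 1 : Nat)) : Int) = (t : Int) + 1 by push_cast; ring]
    rw [PySem.List.pyRange_one_succ_right (by omega), List.foldl_append, ih (by omega)]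
    simp only [List.foldl_cons, List.foldl_nil]
    rw [PySem.List.pySetD_natCast, PySem.List.pyGetD_natCast]
    rw [List.getD_eq_getElem _ _ (by simpa using ht)]
    apply List.ext_getElem (by simp)
    intro k hk1 hk2
    rw [List.getElem_set]
    simp only [List.getElem_map, List.getElem_range]
    have hk : k < m := by simpa using hk2
    by_cases hkt : t = k
    · subst hkt
      rw [if_pos rfl, if_neg (by omega), if_pos (by omega)]
      ring
    · rw [if_neg hkt]
      by_cases h : (k : Int) < (t : Int)
      · rw [if_pos h, if_pos (by omega)]
      · rw [if_neg h, if_neg (by omega)]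

theorem pvCnt_cons (v : Int) (p : List Int) (j : Int) :
    pvCnt (v :: p) j = (if j < v then (1 : Int) else 0) + pvCnt p j := by
  simp [pvCnt]

theorem pv_bump (m : Nat) (p : List Int) (v : Int) (hv : 0 < v → v ≤ (m : Int)) :
    (PySem.List.pyRange 0 v 1).foldl
      (fun cs i2 => PySem.List.pySetD cs i2 (PySem.List.pyGetD cs i2 0 + 1)) (pvCells m p)
    = pvCells m (v :: p) := by
  by_cases hpos : 0 < v
  · have hvt : v = ((v.toNat : Nat) : Int) := by omega
    rw [hvt, pv_bump_aux m p v.toNat (by omega)]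
    apply List.map_congr_left
    intro j _
    rw [pvCnt_cons]
    rw [show ((v.toNat : Nat) : Int) = v by omega]
    by_cases h : (j : Int) < v
    · rw [if_pos h]; ring
    · rw [if_neg h]; ring
  · rw [PySem.List.pyRange_one_eq_nil (by omega)]
    simp only [List.foldl_nil, pvCells]
    apply List.map_congr_left
    intro j _
    rw [pvCnt_cons, if_neg (by omega)]
    ring

def pvRowB (v : Int) (p : List Int) : List Int :=
  (PySem.List.pyRange 0 v 1).map (fun j => v - j + pvCnt p j)

theorem pv_row (m : Nat) (p : List Int) (v : Int) (hv : 0 < v → v ≤ (m : Int)) :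
    (PySem.List.pyRange 0 v 1).foldl
      (fun r j => r ++ [PySem.List.pyGetD (pvCells m p) j 0 + v - j]) []
    = pvRowB v p := by
  rw [PySem.List.foldl_append_singleton_eq_map]
  apply List.map_congr_left
  intro j hj
  rw [PySem.List.mem_pyRange_one] at hj
  have hjm : j.toNat < m := by omega
  rw [PySem.List.pyGetD_eq_getElem _ _ (by omega) (by simp [pvCells]; omega)]
  simp only [pvCells, List.getElem_map, List.getElem_range]
  rw [show ((j.toNat : Nat) : Int) = j by omega]
  ring

def pvStepA (st : List Int × List (List Int)) (cur_row_len : Int) : List Int × List (List Int) :=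
  let cur_row_hooks := (PySem.List.pyRange 0 cur_row_len 1).foldl
    (fun r j => r ++ [PySem.List.pyGetD st.1 j 0 + cur_row_len - j]) []
  let cells' := (PySem.List.pyRange 0 cur_row_len 1).foldl
    (fun cs i2 => PySem.List.pySetD cs i2 (PySem.List.pyGetD cs i2 0 + 1)) st.1
  (cells', st.2 ++ [cur_row_hooks])

def pvRows : List Int → List Int → List (List Int)
  | [], _ => []
  | v :: vs, p => pvRowB v p :: pvRows vs (v :: p)

theorem pv_fold (m : Nat) : ∀ (vals p : List Int) (acc : List (List Int)),
    (∀ v ∈ vals, 0 < v → v ≤ (m : Int)) →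
    vals.foldl pvStepA (pvCells m p, acc) = (pvCells m (vals.reverse ++ p), acc ++ pvRows vals p) := by
  intro vals
  induction vals with
  | nil => intro p acc _; simp [pvRows]
  | cons v vs ih =>
    intro p acc hall
    have hstep : pvStepA (pvCells m p, acc) v = (pvCells m (v :: p), acc ++ [pvRowB v p]) := by
      unfold pvStepA
      simp only
      rw [pv_bump m p v (hall v (by simp)), pv_row m p v (hall v (by simp))]
    rw [List.foldl_cons, hstep, ih (v :: p) (acc ++ [pvRowB v p]) (fun w hw => hall w (by simp [hw]))]
    simp [pvRows]

theorem pv_foldrev (xs : List Int) (g : (List Int × List (List Int)) → Int → (List Int × List (List Int)))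
    (init : List Int × List (List Int)) :
    ((PySem.List.pyRange 0 (xs.length : Int) 1).reverse).foldl
      (fun a i => g a (PySem.List.pyGetD xs i 0)) init = xs.reverse.foldl g init := by
  rw [List.foldl_reverse, List.foldl_reverse]
  conv_rhs => rw [← PySem.List.map_pyGetD_pyRange_zero' xs 0]
  rw [List.foldr_map]

theorem pvCells_nil (m : Nat) : pvCells m [] = List.replicate m 0 := by
  simp [pvCells, pvCnt]

theorem pv_hook_A (int_part : List Int) (h : Pre_hook_lengths int_part) :
    hook_lengths int_part = pvRows int_part.reverse [] := by
  obtain ⟨hne, hall⟩ := h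
  have h1 : hook_lengths int_part =
      ((PySem.List.pyRange ((int_part.length : Int) - 1) (-1) (-1)).foldl
        (fun st i => pvStepA st (PySem.List.pyGetD int_part i 0))
        (List.replicate (PySem.List.pyGetD int_part 0 0).toNat 0, [])).2 := rfl
  rw [h1, PySem.List.pyRange_neg_one_eq_reverse]
  rw [show ((-1 : Int) + 1) = 0 by ring, show ((int_part.length : Int) - 1 + 1) = (int_part.length : Int) by ring]
  rw [pv_foldrev, ← pvCells_nil (PySem.List.pyGetD int_part 0 0).toNat]
  rw [pv_fold (PySem.List.pyGetD int_part 0 0).toNat int_part.reverse [] []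
    (by
      intro v hv hv0
      have hmem : v ∈ int_part := by simpa using hv
      have hvh := hall v hmem hv0
      obtain ⟨x, xs, rfl⟩ : ∃ x xs, int_part = x :: xs := by
        cases int_part with
        | nil => exact absurd rfl hne
        | cons x xs => exact ⟨x, xs, rfl⟩
      rw [PySem.List.pyGetD_zero_cons]
      simp only [List.headI] at hvh
      omega)]
  rfl

theorem pvRows_spec : ∀ (l q : List Int),
    pvRows l q = (List.range l.length).map (fun k => pvRowB (l.getD k 0) ((l.take k).reverse ++ q)) := by
  intro l
  induction l with
  | nil => intro q; simp [pvRows]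
  | cons v vs ih =>
    intro q
    rw [show (v :: vs).length = vs.length + 1 from rfl, List.range_succ_eq_map]
    simp only [pvRows, List.map_cons, List.map_map]
    congr 1
    rw [ih (v :: q)]
    apply List.map_congr_left
    intro k _
    simp [Function.comp, List.take_succ_cons, List.reverse_cons, List.append_assoc]

theorem pv_hook_B (int_part : List Int) :
    hook_lengths_alt int_part = pvRows int_part.reverse [] := by
  rw [pvRows_spec]
  apply List.ext_getElem
  · simp [hook_lengths_alt, PySem.List.length_pyRange_one]
  · intro k hk1 hk2
    have hn : k < int_part.length := by
      simpa [hook_lengths_alt, PySem.List.length_pyRange_one] using hk1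
    simp only [hook_lengths_alt, List.getElem_reverse, List.getElem_map, List.length_map,
      PySem.List.length_pyRange_one, sub_zero, Int.toNat_natCast, List.getElem_range,
      List.length_reverse]
    rw [PySem.List.getElem_pyRange_one, zero_add]
    have hi : int_part.length - 1 - k < int_part.length := by omega
    have hk2' : k < int_part.reverse.length := by simpa using hn
    have hget : PySem.List.pyGetD int_part ((int_part.length - 1 - k : Nat) : Int) 0
        = int_part.getD (int_part.length - 1 - k) 0 := by
      rw [PySem.List.pyGetD_natCast]
    have hslice : PySem.List.slice int_part (some (((int_part.length - 1 - k : Nat) : Int) + 1)) none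
        = int_part.drop (int_part.length - k) := by
      rw [show (((int_part.length - 1 - k : Nat) : Int) + 1) = ((int_part.length - k : Nat) : Int) by omega,
        PySem.List.slice_from_natCast]
    have hrevget : int_part.reverse.getD k 0 = int_part.getD (int_part.length - 1 - k) 0 := by
      rw [List.getD_eq_getElem _ _ hk2', List.getD_eq_getElem _ _ hi, List.getElem_reverse]
    have hrevtake : (int_part.reverse.take k).reverse = int_part.drop (int_part.length - k) := by
      rw [List.take_reverse, List.reverse_reverse]
    simp only [List.append_nil, hrevget, hrevtake, hget, hslice, pvRowB, pvCnt]

-- ===== VERDICT (by name: the statement is the Claim_ definition above) =====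
theorem hook_lengths_spec : Claim_equal_hook_lengths := by
  intro int_part _ hpre
  unfold Spec_hook_lengths
  rw [pv_hook_A int_part hpre, pv_hook_B]
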